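-- pv_equiv track=rewrite | github.com/everyoneelse/youtu-graphrag | head_deduplication_reference.py | _normalize_entity_name
-- ===== SOURCE A (Python) =====
-- def _normalize_entity_name(name: str) -> str:
--     """
--     实体名称标准化
--
--     规则：
--     1. 转小写
--     2. 去除首尾空格
--     3. 合并多个连续空格为一个
--     4. 去除常见标点符号
--     5. 统一全角/半角（可选）
--
--     Args:
--         name: 原始实体名称
--
--     Returns:
--         标准化后的名称
--     """
--     if not name:
--         return ""
--
--     # 1. 转小写并去除首尾空格
--     normalized = name.lower().strip()
--
--     # 2. 合并多个空格
--     normalized = ' '.join(normalized.split())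
--
--     # 3. 去除常见标点符号（保留连字符和下划线）
--     remove_chars = ['.', ',', '!', '?', ':', ';', '"', "'", '(', ')', '[', ']', '{', '}']
--     for char in remove_chars:
--         normalized = normalized.replace(char, '')
--
--     # 4. 可选：统一全角/半角（中文环境）
--     # 这里简化处理，实际可使用unicodedata.normalize
--
--     return normalized
-- ===== SOURCE B (Python) =====
-- PUNCT = set('.,!?:;"\'()[]{}')
--
-- def _normalize_entity_name(name: str) -> str:
--     words = name.lower().strip().split()
--     return ' '.join(''.join(ch for ch in word if ch not in PUNCT) for word in words)
-- ===== Notes on version B (the rewrite author's own statement) =====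
-- stated objective: idiomatic
-- what changed: Instead of joining the words and then running 14 whole-string replace passes (with an explicit empty-string guard), B splits into words once and strips punctuation per word with a set-based filter while joining, with no guard.
import Mathlib
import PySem

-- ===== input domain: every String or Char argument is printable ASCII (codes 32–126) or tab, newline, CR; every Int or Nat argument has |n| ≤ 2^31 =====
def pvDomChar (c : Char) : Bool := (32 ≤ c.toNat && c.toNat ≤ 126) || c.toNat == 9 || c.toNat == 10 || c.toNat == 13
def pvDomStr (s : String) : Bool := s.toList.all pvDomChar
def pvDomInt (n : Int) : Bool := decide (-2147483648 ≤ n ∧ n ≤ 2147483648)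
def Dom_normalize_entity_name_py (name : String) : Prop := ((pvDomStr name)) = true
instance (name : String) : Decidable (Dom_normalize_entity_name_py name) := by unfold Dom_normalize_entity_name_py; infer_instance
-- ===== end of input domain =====

-- B drops A's empty-string guard and 14 whole-string replace passes: it splits into words first and strips punctuation per word while joining (idiomatic single scan).

-- ===== PORT A =====
-- A's remove_chars list, in A's order
def pvRemoveChars : List Char := ['.', ',', '!', '?', ':', ';', '"', '\'', '(', ')', '[', ']', '{', '}']

def normalize_entity_name_py (name : String) : String :=
  if name = "" then "" else
    let normalized := PySem.Str.strip (PySem.Str.lower name)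
    let normalized := PySem.Str.join " " (PySem.Str.split₀ normalized)
    pvRemoveChars.foldl (fun s c => PySem.Str.replace s (String.ofList [c]) "") normalized

-- ===== PORT B =====
-- PUNCT = set('.,!?:;"\'()[]{}')
def pvPunct : PySem.Set Char := PySem.Set.ofList ['.', ',', '!', '?', ':', ';', '"', '\'', '(', ')', '[', ']', '{', '}']

-- ''.join(ch for ch in word if ch not in PUNCT)
def pvCleanWord (word : String) : String :=
  String.ofList (word.toList.filter (fun ch => !(PySem.Set.contains pvPunct ch)))

def normalize_entity_name_py_alt (name : String) : String :=
  let words := PySem.Str.split₀ (PySem.Str.strip (PySem.Str.lower name))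
  PySem.Str.join " " (words.map pvCleanWord)

-- ===== PRECONDITION & SPEC =====
def Spec_normalize_entity_name_py (name : String) (out : String) : Prop := out = normalize_entity_name_py_alt name
instance (name : String) (out : String) : Decidable (Spec_normalize_entity_name_py name out) := by unfold Spec_normalize_entity_name_py; infer_instance

-- ===== CLAIM (what is proved, stated in full; the proofs are below) =====
def Claim_equal_normalize_entity_name_py : Prop := ∀ (name : String), Dom_normalize_entity_name_py name → Spec_normalize_entity_name_py name (normalize_entity_name_py name)

-- ===== LEMMAS AND PROOFS =====

-- replace.go with a single-character pattern and empty replacement is a filter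
theorem pv_go_filter (p : Char) :
    ∀ (fuel : Nat) (l acc : List Char), l.length ≤ fuel →
      PySem.Chars.replace.go [p] [] fuel l acc = acc.reverse ++ l.filter (fun c => c ≠ p) := by
  intro fuel
  induction fuel with
  | zero =>
    intro l acc h
    have : l = [] := List.length_eq_zero_iff.mp (Nat.le_zero.mp h)
    subst this
    simp [PySem.Chars.replace.go]
  | succ n ih =>
    intro l acc h
    cases l with
    | nil => simp [PySem.Chars.replace.go]
    | cons c t =>
      by_cases hc : c = p
      · subst hc
        have : ([c].isPrefixOf (c :: t)) = true := by simp [List.isPrefixOf]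
        simp only [PySem.Chars.replace.go, this, if_pos]
        rw [ih]
        · simp
        · simpa using Nat.le_of_succ_le_succ h
      · have hpre : ([p].isPrefixOf (c :: t)) = false := by
          simp [List.isPrefixOf]; exact fun h' => hc h'.symm
        simp only [PySem.Chars.replace.go, hpre]
        rw [if_neg (by simp), ih t (c :: acc) (Nat.le_of_succ_le_succ h)]
        simp [hc]

theorem pv_replace_single (p : Char) (l : List Char) :
    PySem.Chars.replace l [p] [] = l.filter (fun c => c ≠ p) := by
  rw [PySem.Chars.replace]
  simp only [List.isEmpty]
  exact pv_go_filter p l.length l [] (le_refl _)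

theorem pv_foldl_replace (ps : List Char) :
    ∀ (l : List Char),
      ps.foldl (fun s c => PySem.Chars.replace s [c] []) l
        = l.filter (fun c => !(ps.contains c)) := by
  induction ps with
  | nil => intro l; simp
  | cons p ps ih =>
    intro l
    rw [List.foldl_cons, pv_replace_single, ih, List.filter_filter]
    refine List.filter_congr ?_
    intro c _
    by_cases hc : c = p <;> simp [hc]

-- filtering each word before joining with ' ' equals filtering the joined string,
-- provided the filter keeps ' '
theorem pv_join_map_filter (f : Char → Bool) (hf : f ' ' = true) :
    ∀ (ws : List (List Char)),
      PySem.Chars.join [' '] (ws.map (fun w => w.filter f))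
        = (PySem.Chars.join [' '] ws).filter f := by
  intro ws
  induction ws with
  | nil => simp [PySem.Chars.join_nil]
  | cons w rest ih =>
    cases rest with
    | nil => simp [PySem.Chars.join_singleton]
    | cons x t =>
      simp only [List.map_cons] at ih ⊢
      rw [PySem.Chars.join_cons_cons, PySem.Chars.join_cons_cons,
          List.filter_append, List.filter_append, ih]
      simp [hf]

theorem pv_toList_eq (name : String) :
    (normalize_entity_name_py name).toList = (normalize_entity_name_py_alt name).toList := by
  by_cases h : name = ""
  · subst h; decide
  · unfold normalize_entity_name_py normalize_entity_name_py_alt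
    simp only [if_neg h]
    set ws := PySem.Str.split₀ (PySem.Str.strip (PySem.Str.lower name)) with hws
    have hfold : ∀ (cs : List Char) (s : String),
        (cs.foldl (fun s c => PySem.Str.replace s (String.ofList [c]) "") s).toList
          = cs.foldl (fun l c => PySem.Chars.replace l [c] []) s.toList := by
      intro cs
      induction cs with
      | nil => intro s; rfl
      | cons c cs ih =>
        intro s
        simp only [List.foldl_cons, ih, PySem.Str.toList_replace, String.toList_ofList]
        rfl
    have hpred : ∀ c : Char, (!(PySem.Set.contains pvPunct c)) = (!(pvRemoveChars.contains c)) := by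
      have he : pvPunct = pvRemoveChars := by decide
      intro c
      rw [he, PySem.Set.contains_eq_listContains]
    have hsep : (" " : String).toList = [' '] := rfl
    have hsp : (fun c => !(pvRemoveChars.contains c)) ' ' = true := by decide
    rw [hfold, pv_foldl_replace, PySem.Str.toList_join, PySem.Str.toList_join, hsep,
        ← pv_join_map_filter _ hsp]
    refine congrArg (PySem.Chars.join [' ']) ?_
    rw [List.map_map, List.map_map]
    refine List.map_congr_left ?_
    intro w _
    simp only [Function.comp_apply, pvCleanWord, String.toList_ofList]
    exact List.filter_congr (fun c _ => hpred c)

-- ===== VERDICT (by name: the statement is the Claim_ definition above) =====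
theorem normalize_entity_name_py_spec : Claim_equal_normalize_entity_name_py := by
  intro name _
  show normalize_entity_name_py name = normalize_entity_name_py_alt name
  exact String.toList_inj.mp (pv_toList_eq name)
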